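-- pv_equiv track=rewrite | github.com/Sahil170595/LUMAAIAGENTSHACKATHON | SelfHealingPipeline2/Reasoner/reasoner_agent.py | _detect_language_from_context
-- ===== SOURCE A (Python) =====
-- from typing import Dict, List, Optional, Any
--
-- def _detect_language_from_context(issue: Dict) -> str:
--     """Detect programming language from issue context."""
--     context = issue.get("context", {})
--     error_logs = issue.get("error_logs", [])
--
--     # Simple heuristics for language detection
--     if any("python" in str(log).lower() for log in error_logs):
--         return "python"
--     elif any("node" in str(log).lower() or "npm" in str(log).lower() for log in error_logs):
--         return "javascript"
--     elif any("java" in str(log).lower() for log in error_logs):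
--         return "java"
--     elif any("go" in str(log).lower() for log in error_logs):
--         return "go"
--     else:
--         return "unknown"
-- ===== SOURCE B (Python) =====
-- def _detect_language_from_context(issue):
--     """One pass: lowercase each log once, set four flags, then pick by fixed priority."""
--     has_py = has_js = has_java = has_go = False
--     for log in issue.get("error_logs", []):
--         s = str(log).lower()
--         if "python" in s:
--             has_py = True
--         if "node" in s or "npm" in s:
--             has_js = True
--         if "java" in s:
--             has_java = True
--         if "go" in s:
--             has_go = True
--     if has_py:
--         return "python"
--     if has_js:
--         return "javascript"
--     if has_java:
--         return "java"
--     if has_go: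
--         return "go"
--     return "unknown"
-- ===== Notes on version B (the rewrite author's own statement) =====
-- stated objective: alternative
-- what changed: Replaces the four separate any() scans over error_logs by a single pass that lowercases each log once and accumulates four boolean flags, with the priority decision taken once after the scan.
import Mathlib
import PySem

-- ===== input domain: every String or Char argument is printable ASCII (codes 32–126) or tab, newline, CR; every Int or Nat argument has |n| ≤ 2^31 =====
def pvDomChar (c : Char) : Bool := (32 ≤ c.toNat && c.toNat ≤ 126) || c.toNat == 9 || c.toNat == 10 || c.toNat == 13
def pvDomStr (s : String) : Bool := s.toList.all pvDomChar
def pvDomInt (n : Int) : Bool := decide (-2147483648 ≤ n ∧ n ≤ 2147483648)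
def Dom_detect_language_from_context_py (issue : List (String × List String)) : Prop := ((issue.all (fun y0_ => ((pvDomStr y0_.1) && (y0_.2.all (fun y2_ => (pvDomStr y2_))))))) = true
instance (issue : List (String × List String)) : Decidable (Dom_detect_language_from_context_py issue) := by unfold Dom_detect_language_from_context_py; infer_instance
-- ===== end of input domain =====

-- B replaces A's four separate any() scans by one pass accumulating four flags (one lowercasing per log); same result, alternative decomposition.

-- ===== PORT A =====
-- issue.get(k, dflt): first-match lookup in the association list
def pvDictGetD (d : List (String × List String)) (k : String) (dflt : List String) : List String :=
  match d with
  | [] => dflt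
  | (k', v) :: rest => if k' == k then v else pvDictGetD rest k dflt

def detect_language_from_context_py (issue : List (String × List String)) : String :=
  let error_logs := pvDictGetD issue "error_logs" []
  if error_logs.any (fun log => PySem.Str.isIn "python" (PySem.Str.lower log)) then "python"
  else if error_logs.any (fun log => PySem.Str.isIn "node" (PySem.Str.lower log) || PySem.Str.isIn "npm" (PySem.Str.lower log)) then "javascript"
  else if error_logs.any (fun log => PySem.Str.isIn "java" (PySem.Str.lower log)) then "java"
  else if error_logs.any (fun log => PySem.Str.isIn "go" (PySem.Str.lower log)) then "go"
  else "unknown"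

-- ===== PORT B =====
-- one loop step: lowercase once, or each keyword hit into its flag
def pvFlagStep (acc : Bool × Bool × Bool × Bool) (log : String) : Bool × Bool × Bool × Bool :=
  let s := PySem.Str.lower log
  (acc.1 || PySem.Str.isIn "python" s,
   acc.2.1 || (PySem.Str.isIn "node" s || PySem.Str.isIn "npm" s),
   acc.2.2.1 || PySem.Str.isIn "java" s,
   acc.2.2.2 || PySem.Str.isIn "go" s)

def detect_language_from_context_py_alt (issue : List (String × List String)) : String :=
  let logs := pvDictGetD issue "error_logs" []
  let flags := logs.foldl pvFlagStep (false, false, false, false)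
  if flags.1 then "python"
  else if flags.2.1 then "javascript"
  else if flags.2.2.1 then "java"
  else if flags.2.2.2 then "go"
  else "unknown"

-- ===== PRECONDITION & SPEC =====
def Spec_detect_language_from_context_py (issue : List (String × List String)) (out : String) : Prop := out = detect_language_from_context_py_alt issue
instance (issue : List (String × List String)) (out : String) : Decidable (Spec_detect_language_from_context_py issue out) := by unfold Spec_detect_language_from_context_py; infer_instance

-- ===== CLAIM (what is proved, stated in full; the proofs are below) =====
def Claim_equal_detect_language_from_context_py : Prop := ∀ (issue : List (String × List String)), Dom_detect_language_from_context_py issue → Spec_detect_language_from_context_py issue (detect_language_from_context_py issue)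

-- ===== LEMMAS AND PROOFS =====
theorem foldl_flagStep (logs : List String) (acc : Bool × Bool × Bool × Bool) :
    logs.foldl pvFlagStep acc =
      (acc.1 || logs.any (fun log => PySem.Str.isIn "python" (PySem.Str.lower log)),
       acc.2.1 || logs.any (fun log => PySem.Str.isIn "node" (PySem.Str.lower log) || PySem.Str.isIn "npm" (PySem.Str.lower log)),
       acc.2.2.1 || logs.any (fun log => PySem.Str.isIn "java" (PySem.Str.lower log)),
       acc.2.2.2 || logs.any (fun log => PySem.Str.isIn "go" (PySem.Str.lower log))) := by
  induction logs generalizing acc with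
  | nil => simp
  | cons l ls ih =>
    simp only [List.foldl_cons, List.any_cons, ih, pvFlagStep, Bool.or_assoc]

-- ===== VERDICT (by name: the statement is the Claim_ definition above) =====
theorem detect_language_from_context_py_spec : Claim_equal_detect_language_from_context_py := by
  intro issue _
  unfold Spec_detect_language_from_context_py detect_language_from_context_py detect_language_from_context_py_alt
  simp only [foldl_flagStep, Bool.false_or]
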